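-- pv_equiv track=rewrite | github.com/silviudragan/IA_tests | test.py | convert
-- ===== SOURCE A (Python) =====
-- def convert(fraza):
-- 	fraza = str(fraza)[5:]
-- 	if '_' not in fraza:
-- 		ok = 0
-- 		for index,char in enumerate(fraza):
-- 			if char.isupper() and index != 0:
-- 				fraza = fraza[:index+ok]+' '+fraza[index+ok:]
-- 				ok += 1
-- 		return fraza.lower()
-- 	else:
-- 		return fraza.replace('_',' ').lower()
-- ===== SOURCE B (Python) =====
-- _UP = {ord(c): ' ' + c for c in 'ABCDEFGHIJKLMNOPQRSTUVWXYZ'}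
--
-- def convert(fraza):
--     f = str(fraza)[5:]
--     if '_' in f:
--         return f.replace('_', ' ').lower()
--     t = f.translate(_UP)
--     if f and f[0].isupper():
--         t = t[1:]
--     return t.lower()
-- ===== Notes on version B (the rewrite author's own statement) =====
-- stated objective: faster
-- what changed: Instead of a per-character Python loop that repeatedly re-slices the string to insert a space before each non-first uppercase letter, B does one C-level str.translate with a table mapping each uppercase letter to a space followed by that letter, drops the leading space if the first character is uppercase, and lowers once.
import Mathlib
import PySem

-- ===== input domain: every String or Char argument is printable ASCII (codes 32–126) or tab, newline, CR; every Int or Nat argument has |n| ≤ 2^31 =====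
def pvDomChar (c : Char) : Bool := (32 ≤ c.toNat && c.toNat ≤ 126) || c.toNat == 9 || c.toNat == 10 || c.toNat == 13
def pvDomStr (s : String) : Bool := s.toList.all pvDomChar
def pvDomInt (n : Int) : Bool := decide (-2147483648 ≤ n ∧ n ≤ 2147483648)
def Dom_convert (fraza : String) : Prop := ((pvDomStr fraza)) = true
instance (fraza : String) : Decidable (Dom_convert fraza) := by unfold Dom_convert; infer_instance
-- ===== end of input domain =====

-- B replaces A's per-character Python loop with repeated string re-slicing by one str.translate
-- table mapping each of the 26 ASCII uppercase letters to a space followed by the letter (dropping the space inserted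
-- before an uppercase first character), then one lower(); objective: faster.

-- ===== PORT A =====
-- A's loop: enumerate runs over the ORIGINAL sliced string while `fraza` is rebuilt by
-- `fraza[:index+ok] + ' ' + fraza[index+ok:]`; for these natural bounds the slices are exactly
-- take/drop (PySem.List.slice_to_natCast / slice_from_natCast).
def convertLoop : List Char → Nat → List Char → Nat → List Char
  | [], _, cur, _ => cur
  | c :: rest, i, cur, ok =>
    if PySem.Chars.isupper c && decide (i ≠ 0) then
      convertLoop rest (i + 1) (cur.take (i + ok) ++ ' ' :: cur.drop (i + ok)) (ok + 1)
    else
      convertLoop rest (i + 1) cur ok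

def convert (fraza : String) : String :=
  let f := PySem.List.slice fraza.toList (some 5) none
  if !(PySem.Chars.isIn ['_'] f) then
    String.ofList (PySem.Chars.lower (convertLoop f 0 f 0))
  else
    String.ofList (PySem.Chars.lower (PySem.Chars.replace f ['_'] [' ']))

-- ===== PORT B =====
-- the keys of Source B's translate table _UP: the 26 ASCII uppercase letters
def pyUpper : List Char := "ABCDEFGHIJKLMNOPQRSTUVWXYZ".toList

-- f.translate(_UP): each character in the table is replaced by a space followed by itself, others kept
def translateUp : List Char → List Char
  | [] => []
  | c :: rest => (if c ∈ pyUpper then [' ', c] else [c]) ++ translateUp rest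

def convert_alt (fraza : String) : String :=
  let f := PySem.List.slice fraza.toList (some 5) none
  if PySem.Chars.isIn ['_'] f then
    String.ofList (PySem.Chars.lower (PySem.Chars.replace f ['_'] [' ']))
  else
    let t := translateUp f
    -- `if f and f[0].isupper(): t = t[1:]`  (t[1:] is List.tail, PySem.List.slice_from_one)
    let t' := if (match f.head? with
                  | some c => PySem.Chars.isupper c
                  | none => false) then t.tail else t
    String.ofList (PySem.Chars.lower t')

-- ===== PRECONDITION & SPEC =====
def Spec_convert (fraza : String) (out : String) : Prop := out = convert_alt fraza
instance (fraza : String) (out : String) : Decidable (Spec_convert fraza out) := by unfold Spec_convert; infer_instance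

-- ===== CLAIM (what is proved, stated in full; the proofs are below) =====
def Claim_equal_convert : Prop := ∀ (fraza : String), Dom_convert fraza → Spec_convert fraza (convert fraza)

-- ===== LEMMAS AND PROOFS =====
-- membership in Source B's 26-letter table is exactly Python's c.isupper() (= 'A' ≤ c ≤ 'Z')
lemma mem_pyUpper_eq_isupper (c : Char) : decide (c ∈ pyUpper) = PySem.Chars.isupper c := by
  simp only [pyUpper, PySem.Chars.isupper]
  rcases c with ⟨⟨⟨n, hn⟩⟩, hv⟩
  simp [List.mem_cons, Char.ext_iff, Char.le_def, UInt32.le_iff_toNat_le, UInt32.ext_iff]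
  rw [Bool.eq_iff_iff]
  simp only [Bool.or_eq_true, Bool.and_eq_true, decide_eq_true_eq]
  omega

-- Invariant of A's loop from index 1 on: `cur` is the already-spaced prefix `pre`
-- (of length i + ok) followed by the untouched remainder, and every remaining index is ≠ 0,
-- so A inserts a space before exactly the uppercase characters — B's translation.
lemma convertLoop_eq_translateUp : ∀ (rest pre : List Char) (i ok : Nat),
    pre.length = i + ok → i ≠ 0 →
    convertLoop rest i (pre ++ rest) ok = pre ++ translateUp rest := by
  intro rest
  induction rest with
  | nil => intro pre i ok h hi; simp [convertLoop, translateUp]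
  | cons c r ih =>
    intro pre i ok h hi
    simp only [convertLoop, translateUp]
    by_cases hu : PySem.Chars.isupper c = true
    · rw [if_pos (by simp [hu, hi])]
      have htake : (pre ++ c :: r).take (i + ok) = pre := by
        rw [← h]; exact List.take_left ..
      have hdrop : (pre ++ c :: r).drop (i + ok) = c :: r := by
        rw [← h]; exact List.drop_left ..
      rw [htake, hdrop]
      have hc : (c ∈ pyUpper) := by
        have := mem_pyUpper_eq_isupper c; rw [hu] at this; simpa using this
      have hpre : pre ++ ' ' :: c :: r = (pre ++ [' ', c]) ++ r := by simp
      rw [hpre, ih (pre ++ [' ', c]) (i + 1) (ok + 1) (by simp [h]; omega) (by omega)]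
      simp [hc]
    · rw [if_neg (by simp [hu])]
      have hc : ¬ (c ∈ pyUpper) := by
        have := mem_pyUpper_eq_isupper c
        simp only [Bool.not_eq_true] at hu; rw [hu] at this; simpa using this
      have hpre : pre ++ c :: r = (pre ++ [c]) ++ r := by simp
      rw [hpre, ih (pre ++ [c]) (i + 1) ok (by simp [h]; omega) (by omega)]
      simp [hc]

-- A's whole loop equals B's translate with the leading space dropped when the first
-- character is uppercase.
lemma convertLoop_eq_fixed (f : List Char) :
    convertLoop f 0 f 0 =
      (if (match f.head? with
           | some c => PySem.Chars.isupper c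
           | none => false) then (translateUp f).tail else translateUp f) := by
  cases f with
  | nil => simp [convertLoop, translateUp]
  | cons c r =>
    simp only [convertLoop, List.head?_cons]
    rw [if_neg (by simp)]
    have h1 : convertLoop r 1 ([c] ++ r) 0 = [c] ++ translateUp r :=
      convertLoop_eq_translateUp r [c] 1 0 (by simp) (by omega)
    simp only [List.singleton_append] at h1
    rw [h1]
    by_cases hu : PySem.Chars.isupper c = true
    · have hc : (c ∈ pyUpper) := by
        have := mem_pyUpper_eq_isupper c; rw [hu] at this; simpa using this
      simp [translateUp, hu, hc]
    · have hc : ¬ (c ∈ pyUpper) := by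
        have := mem_pyUpper_eq_isupper c
        simp only [Bool.not_eq_true] at hu; rw [hu] at this; simpa using this
      simp [translateUp, hu, hc]

-- ===== VERDICT (by name: the statement is the Claim_ definition above) =====
theorem convert_spec : Claim_equal_convert := by
  intro fraza _
  unfold Spec_convert convert convert_alt
  by_cases h : PySem.Chars.isIn ['_'] (PySem.List.slice fraza.toList (some 5) none) = true
  · simp [h]
  · simp only [Bool.not_eq_true] at h
    simp only [h, Bool.not_false, if_true, Bool.false_eq_true, if_false]
    exact congrArg String.ofList
      (congrArg PySem.Chars.lower
        (convertLoop_eq_fixed (PySem.List.slice fraza.toList (some 5) none)))
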